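-- pv_equiv track=rewrite | github.com/JHyuk2/Hyuk2Coding | Baekjoon/2491_rere.py | find_max_inc
-- ===== SOURCE A (Python) =====
-- def find_max_inc(temp):
--     res = 1
--     length = 1
--     for i in range(1, len(temp)):
--         if temp[i-1] - temp[i] >= 0:
--             length += 1
--         else:
--             if res < length:
--                 res = length
--             length = 1
--
--     if res < length:
--         res = length
--     return res
-- ===== SOURCE B (Python) =====
-- def find_max_inc(temp):
--     n = len(temp)
--     if n <= 1:
--         return 1
--     starts = [0] + [i for i in range(1, n) if temp[i - 1] < temp[i]]
--     bounds = starts + [n]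
--     return max(b - a for a, b in zip(bounds, bounds[1:]))
-- ===== Notes on version B (the rewrite author's own statement) =====
-- stated objective: alternative
-- what changed: Replaces A's fused single-pass res/length scan with a build-then-reduce decomposition: first collect the segment-start indices where temp[i-1] < temp[i], then return the maximum gap between consecutive segment boundaries.
import Mathlib
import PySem

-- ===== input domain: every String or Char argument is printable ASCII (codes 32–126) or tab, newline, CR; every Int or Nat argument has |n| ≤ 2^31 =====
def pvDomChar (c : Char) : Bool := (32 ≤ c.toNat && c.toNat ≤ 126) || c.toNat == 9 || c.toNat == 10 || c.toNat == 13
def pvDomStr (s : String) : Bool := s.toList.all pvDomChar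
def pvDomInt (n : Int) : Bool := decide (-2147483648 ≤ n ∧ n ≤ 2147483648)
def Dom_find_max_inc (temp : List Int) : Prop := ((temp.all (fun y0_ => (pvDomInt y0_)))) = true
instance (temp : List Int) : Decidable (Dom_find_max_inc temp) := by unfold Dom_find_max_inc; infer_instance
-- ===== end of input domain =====

-- B replaces A's fused single-pass res/length scan by building the list of segment-start
-- indices and maximising the gap between consecutive segment boundaries (objective: alternative).
-- All list indices used by either program are in range, so pyGetD with default 0 is exact.

-- ===== PORT A =====
-- A-side helper: the body of A's for-loop, state (res, length)
def pvStepA (temp : List Int) (st : Int × Int) (i : Int) : Int × Int :=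
  if PySem.List.pyGetD temp (i - 1) 0 - PySem.List.pyGetD temp i 0 ≥ 0 then
    (st.1, st.2 + 1)
  else
    ((if st.1 < st.2 then st.2 else st.1), 1)

def find_max_inc (temp : List Int) : Int :=
  let p := (PySem.List.pyRange 1 (temp.length : Int) 1).foldl (pvStepA temp) (1, 1)
  if p.1 < p.2 then p.2 else p.1

-- ===== PORT B =====
-- B-side helper: starts = [0] + [i for i in range(1, n) if temp[i-1] < temp[i]]
def pvStartsB (temp : List Int) : List Int :=
  0 :: (PySem.List.pyRange 1 (temp.length : Int) 1).filter
        (fun i => decide (PySem.List.pyGetD temp (i - 1) 0 < PySem.List.pyGetD temp i 0))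

def find_max_inc_alt (temp : List Int) : Int :=
  if ((temp.length : Int)) ≤ 1 then 1
  else
    let bounds := pvStartsB temp ++ [((temp.length : Int))]
    let gapsL := (bounds.zip bounds.tail).map (fun ab => ab.2 - ab.1)
    match gapsL with
    | [] => 1          -- unreachable: bounds always has ≥ 2 elements here
    | g :: gs => gs.foldl max g

-- ===== PRECONDITION & SPEC =====
def Spec_find_max_inc (temp : List Int) (out : Int) : Prop := out = find_max_inc_alt temp
instance (temp : List Int) (out : Int) : Decidable (Spec_find_max_inc temp out) := by unfold Spec_find_max_inc; infer_instance

-- ===== CLAIM (what is proved, stated in full; the proofs are below) =====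
def Claim_equal_find_max_inc : Prop := ∀ (temp : List Int), Dom_find_max_inc temp → Spec_find_max_inc temp (find_max_inc temp)

-- ===== LEMMAS AND PROOFS =====

-- gaps between consecutive elements of a boundary list
def pvGaps : List Int → List Int
  | a :: b :: rest => (b - a) :: pvGaps (b :: rest)
  | _ => []

def pvLastB (l : List Int) : Int := l.getLast?.getD 0

-- starts list restricted to indices < m
def pvStartsTo (temp : List Int) (m : Int) : List Int :=
  0 :: (PySem.List.pyRange 1 m 1).filter
        (fun i => decide (PySem.List.pyGetD temp (i - 1) 0 < PySem.List.pyGetD temp i 0))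

theorem pvZipGaps (l : List Int) :
    (l.zip l.tail).map (fun ab => ab.2 - ab.1) = pvGaps l := by
  match l with
  | [] => simp [pvGaps]
  | [a] => simp [pvGaps]
  | a :: b :: rest =>
      simpa [pvGaps] using pvZipGaps (b :: rest)

theorem pvLastB_cons_cons (a b : Int) (r : List Int) :
    pvLastB (a :: b :: r) = pvLastB (b :: r) := by
  simp [pvLastB, List.getLast?_cons_cons]

theorem pvGaps_concat (s : List Int) (x : Int) (hs : s ≠ []) :
    pvGaps (s ++ [x]) = pvGaps s ++ [x - pvLastB s] := by
  match s with
  | [] => exact absurd rfl hs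
  | [a] => simp [pvGaps, pvLastB]
  | a :: b :: r =>
      have ih := pvGaps_concat (b :: r) x (by simp)
      simp only [List.cons_append] at ih ⊢
      simp [pvGaps, ih, pvLastB_cons_cons]

theorem pvFoldMax_concat (l : List Int) (x a : Int) :
    (l ++ [x]).foldl max a = max (l.foldl max a) x := by
  simp [List.foldl_append]

-- invariant of A's loop after processing range(1, m)
theorem pvInv (temp : List Int) :
    ∀ m : Int, 1 ≤ m →
      ((PySem.List.pyRange 1 m 1).foldl (pvStepA temp) (1, 1)).2
          = m - pvLastB (pvStartsTo temp m)
      ∧ ((PySem.List.pyRange 1 m 1).foldl (pvStepA temp) (1, 1)).1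
          = (pvGaps (pvStartsTo temp m)).foldl max 1 := by
  intro m hm
  induction m, hm using Int.le_induction with
  | base => simp [PySem.List.pyRange_one_eq_nil, pvStartsTo, pvGaps, pvLastB]
  | succ m hm ih =>
      have hr : PySem.List.pyRange 1 (m + 1) 1 = PySem.List.pyRange 1 m 1 ++ [m] :=
        PySem.List.pyRange_one_succ_right hm
      obtain ⟨ih2, ih1⟩ := ih
      rw [hr]
      simp only [List.foldl_append, List.foldl_cons, List.foldl_nil]
      by_cases hc : PySem.List.pyGetD temp (m - 1) 0 - PySem.List.pyGetD temp m 0 ≥ 0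
      · -- non-increasing at m: length += 1, starts unchanged
        have hfilter : pvStartsTo temp (m + 1) = pvStartsTo temp m := by
          simp only [pvStartsTo, hr, List.filter_append, List.filter_cons, List.filter_nil]
          have : ¬ (PySem.List.pyGetD temp (m - 1) 0 < PySem.List.pyGetD temp m 0) := by omega
          simp [this]
        rw [hfilter]
        constructor
        · simp only [pvStepA]; rw [if_pos hc]; simp; omega
        · simp only [pvStepA]; rw [if_pos hc]; simpa using ih1
      · -- reset at m: res = max res length, length = 1, starts gains m
        have hfilter : pvStartsTo temp (m + 1) = pvStartsTo temp m ++ [m] := by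
          simp only [pvStartsTo, hr, List.filter_append, List.filter_cons, List.filter_nil]
          have : PySem.List.pyGetD temp (m - 1) 0 < PySem.List.pyGetD temp m 0 := by omega
          simp [this]
        have hne : pvStartsTo temp m ≠ [] := by simp [pvStartsTo]
        constructor
        · rw [hfilter]
          simp only [pvStepA]; rw [if_neg hc]
          simp [pvLastB]
        · rw [hfilter, pvGaps_concat _ _ hne, pvFoldMax_concat, ← ih1, ← ih2]
          simp only [pvStepA]; rw [if_neg hc]
          dsimp only
          split <;> omega

theorem find_max_inc_eq (temp : List Int) : find_max_inc temp = find_max_inc_alt temp := by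
  by_cases hlen : (temp.length : Int) ≤ 1
  · -- n ≤ 1: A's loop range is empty, both return 1
    have hr : PySem.List.pyRange 1 (temp.length : Int) 1 = [] :=
      PySem.List.pyRange_one_eq_nil hlen
    simp [find_max_inc, find_max_inc_alt, hr, hlen]
  · have h1 : (1 : Int) ≤ (temp.length : Int) := by omega
    obtain ⟨h2, h1'⟩ := pvInv temp (temp.length : Int) h1
    have hstarts : pvStartsB temp = pvStartsTo temp (temp.length : Int) := rfl
    -- first gap of bounds is ≥ 1
    set f := (PySem.List.pyRange 1 (temp.length : Int) 1).filter
        (fun i => decide (PySem.List.pyGetD temp (i - 1) 0 < PySem.List.pyGetD temp i 0)) with hf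
    have hbounds : pvStartsB temp ++ [(temp.length : Int)]
        = 0 :: (f ++ [(temp.length : Int)]) := by
      simp [pvStartsB, hf]
    have hne : pvStartsTo temp (temp.length : Int) ≠ [] := by simp [pvStartsTo]
    have hgaps : pvGaps (pvStartsB temp ++ [(temp.length : Int)])
        = pvGaps (pvStartsTo temp (temp.length : Int)) ++ [(temp.length : Int) - pvLastB (pvStartsTo temp (temp.length : Int))] := by
      rw [hstarts, pvGaps_concat _ _ hne]
    -- head of f ++ [n] is ≥ 1
    have hhead : ∀ (y : Int) (r : List Int), f ++ [(temp.length : Int)] = y :: r → 1 ≤ y := by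
      intro y r h
      cases hfc : f with
      | nil => rw [hfc] at h; simp at h; omega
      | cons a t =>
          rw [hfc] at h
          simp at h
          have : a ∈ f := by rw [hfc]; exact List.mem_cons_self
          have : a ∈ PySem.List.pyRange 1 (temp.length : Int) 1 := List.mem_of_mem_filter this
          rw [PySem.List.mem_pyRange_one] at this
          omega
    cases hfl : f ++ [(temp.length : Int)] with
    | nil => simp at hfl
    | cons y r =>
        have hy : 1 ≤ y := hhead y r hfl
        -- B's value
        have hBgaps : ((pvStartsB temp ++ [(temp.length : Int)]).zip
              (pvStartsB temp ++ [(temp.length : Int)]).tail).map (fun ab => ab.2 - ab.1)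
            = (y - 0) :: pvGaps (y :: r) := by
          rw [pvZipGaps, hbounds, hfl, pvGaps]
        have hB : find_max_inc_alt temp = (pvGaps (y :: r)).foldl max (y - 0) := by
          simp only [find_max_inc_alt]
          rw [if_neg (by omega)]
          rw [hBgaps]
        -- A's value
        have hA : find_max_inc temp
            = ((y - 0) :: pvGaps (y :: r)).foldl max 1 := by
          simp only [find_max_inc]
          have : (if ((PySem.List.pyRange 1 (temp.length : Int) 1).foldl (pvStepA temp) (1, 1)).1
                    < ((PySem.List.pyRange 1 (temp.length : Int) 1).foldl (pvStepA temp) (1, 1)).2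
                then ((PySem.List.pyRange 1 (temp.length : Int) 1).foldl (pvStepA temp) (1, 1)).2
                else ((PySem.List.pyRange 1 (temp.length : Int) 1).foldl (pvStepA temp) (1, 1)).1)
              = max ((PySem.List.pyRange 1 (temp.length : Int) 1).foldl (pvStepA temp) (1, 1)).1
                    ((PySem.List.pyRange 1 (temp.length : Int) 1).foldl (pvStepA temp) (1, 1)).2 := by
            split <;> omega
          rw [this, h1', h2]
          have := pvFoldMax_concat (pvGaps (pvStartsTo temp (temp.length : Int)))
            ((temp.length : Int) - pvLastB (pvStartsTo temp (temp.length : Int))) 1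
          rw [← this, ← hgaps, hbounds, hfl, pvGaps]
        rw [hA, hB]
        simp only [List.foldl_cons]
        have : max 1 (y - 0) = (y - 0) := by omega
        rw [this]

-- ===== VERDICT (by name: the statement is the Claim_ definition above) =====
theorem find_max_inc_spec : Claim_equal_find_max_inc := by
  intro temp _
  unfold Spec_find_max_inc
  exact find_max_inc_eq temp
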